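-- pv_equiv track=rewrite | github.com/hailingfang/biobrary | biobrary/misc.py | island_location_by_position
-- ===== SOURCE A (Python) =====
-- def island_location_by_position(islands: "list", pos: "int"):
--     """
--     Given a list of islands, and a point with absolut postion. Calculate
--     which lsland this point located and the distances from both islands
--     at both side.
--
--     Paramters
--     --------------
--     islands: a sorted list of islands.
--     pos: a int represent the absolute position
--
--     Returns
--     --------------
--     location: the id of island, on which the point located.
--         The id of left most island is 1. None for out of islands.
--     dist_left: the distance or offset from the island at most left side.
--         None if location == None
--     dist_right: the distance of offset from the island at most right side.
--         None if location  == None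
--     """
--     location = None
--     idx = 0
--     for island in islands:
--         idx += 1
--         if pos >= island[0] and pos <= island[1]:
--             location = idx
--
--     if not location:
--         dist_left = None
--         dist_right = None
--     else:
--         island_size = []
--         for island in islands:
--             island_size.append(island[1] - island[0] + 1)
--         dist_left = sum(island_size[:location - 1]) + (pos - islands[location - 1][0])
--         dist_right = sum(island_size[location:]) + (islands[location - 1][1] - pos)
--
--     return location, dist_left, dist_right
-- ===== SOURCE B (Python) =====
-- def island_location_by_position(islands: "list", pos: "int"):
--     location = None
--     dist_left = None
--     total = 0
--     idx = 0
--     for start, end in islands: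
--         idx += 1
--         if start <= pos <= end:
--             location = idx
--             dist_left = total + (pos - start)
--         total += end - start + 1
--     if location is None:
--         return None, None, None
--     return location, dist_left, total - 1 - dist_left
-- ===== Notes on version B (the rewrite author's own statement) =====
-- stated objective: alternative
-- what changed: Single pass keeping a running cumulative size sum; dist_left is captured at the match and dist_right is derived from the identity dist_left + dist_right = total - 1, removing A's second loop and its two slice-and-sum passes.
import Mathlib
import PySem

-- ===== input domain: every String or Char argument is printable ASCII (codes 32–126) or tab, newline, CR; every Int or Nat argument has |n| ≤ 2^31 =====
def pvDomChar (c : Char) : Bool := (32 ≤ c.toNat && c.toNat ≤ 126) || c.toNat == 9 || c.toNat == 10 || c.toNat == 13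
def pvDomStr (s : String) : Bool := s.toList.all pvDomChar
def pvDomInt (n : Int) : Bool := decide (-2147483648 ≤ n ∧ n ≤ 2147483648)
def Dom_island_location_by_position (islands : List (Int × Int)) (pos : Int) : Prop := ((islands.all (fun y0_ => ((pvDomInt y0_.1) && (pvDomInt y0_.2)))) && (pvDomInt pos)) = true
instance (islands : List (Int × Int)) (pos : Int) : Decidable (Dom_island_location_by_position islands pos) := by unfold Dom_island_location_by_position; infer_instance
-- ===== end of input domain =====

-- B replaces A's several passes (match scan, size-list build, two slice sums) by one pass with a
-- running cumulative size sum, deriving dist_right from dist_left + dist_right = total - 1.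


-- ===== PORT A =====
-- the first 'for island in islands' loop: last match wins, idx counts from 1
def pvLocLoop (pos : Int) : List (Int × Int) → Int → Option Int → Option Int
  | [], _, loc => loc
  | isl :: rest, idx, loc =>
      pvLocLoop pos rest (idx + 1) (if pos ≥ isl.1 ∧ pos ≤ isl.2 then some (idx + 1) else loc)

def island_location_by_position (islands : List (Int × Int)) (pos : Int) : Option Int × Option Int × Option Int :=
  let location := pvLocLoop pos islands 0 none
  match location with
  | none => (none, none, none)
  | some loc =>
      if loc = 0 then (none, none, none)   -- 'if not location' is also true for location == 0
      else
        let island_size := islands.foldl (fun acc isl => acc ++ [isl.2 - isl.1 + 1]) []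
        match PySem.List.pyGet? islands (loc - 1) with
        | none => (none, none, none)       -- totality guard; Python's islands[location-1] is always in range
        | some isl =>
            let dist_left := (PySem.List.slice island_size none (some (loc - 1))).sum + (pos - isl.1)
            let dist_right := (PySem.List.slice island_size (some loc) none).sum + (isl.2 - pos)
            (some loc, some dist_left, some dist_right)

-- ===== PORT B =====
-- single pass; state = (location, dist_left, total, idx)
def pvLoopB (pos : Int) : List (Int × Int) → Option Int × Int × Int × Int → Option Int × Int × Int × Int
  | [], st => st
  | isl :: rest, (loc, dl, total, idx) =>
      let idx' := idx + 1
      let st' := if isl.1 ≤ pos ∧ pos ≤ isl.2 then (some idx', total + (pos - isl.1)) else (loc, dl)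
      pvLoopB pos rest (st'.1, st'.2, total + (isl.2 - isl.1 + 1), idx')

def island_location_by_position_alt (islands : List (Int × Int)) (pos : Int) : Option Int × Option Int × Option Int :=
  let st := pvLoopB pos islands (none, 0, 0, 0)
  match st.1 with
  | none => (none, none, none)
  | some loc => (some loc, some st.2.1, some (st.2.2.1 - 1 - st.2.1))

-- ===== PRECONDITION & SPEC =====
def Spec_island_location_by_position (islands : List (Int × Int)) (pos : Int) (out : Option Int × Option Int × Option Int) : Prop := out = island_location_by_position_alt islands pos
instance (islands : List (Int × Int)) (pos : Int) (out : Option Int × Option Int × Option Int) : Decidable (Spec_island_location_by_position islands pos out) := by unfold Spec_island_location_by_position; infer_instance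

-- ===== CLAIM (what is proved, stated in full; the proofs are below) =====
def Claim_equal_island_location_by_position : Prop := ∀ (islands : List (Int × Int)) (pos : Int), Dom_island_location_by_position islands pos → Spec_island_location_by_position islands pos (island_location_by_position islands pos)

-- ===== LEMMAS AND PROOFS =====

-- last matching island of the list: (0-based index, start, end)
def pvLastRel (pos : Int) : List (Int × Int) → Option (Nat × Int × Int)
  | [] => none
  | isl :: rest =>
      match pvLastRel pos rest with
      | some (k, st, en) => some (k + 1, st, en)
      | none => if pos ≥ isl.1 ∧ pos ≤ isl.2 then some (0, isl.1, isl.2) else none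

def pvSize (p : Int × Int) : Int := p.2 - p.1 + 1

theorem pvLocLoop_spec (pos : Int) (l : List (Int × Int)) : ∀ (idx : Int) (loc : Option Int),
    pvLocLoop pos l idx loc =
      match pvLastRel pos l with
      | none => loc
      | some (k, _, _) => some (idx + (k : Int) + 1) := by
  induction l with
  | nil => intro idx loc; simp [pvLocLoop, pvLastRel]
  | cons isl rest ih =>
      intro idx loc
      simp only [pvLocLoop, pvLastRel, ih]
      rcases h : pvLastRel pos rest with _ | ⟨k, st, en⟩
      · by_cases hc : pos ≥ isl.1 ∧ pos ≤ isl.2 <;> simp [hc]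
      · simp only []
        push_cast
        ring_nf

theorem pvLoopB_spec (pos : Int) (l : List (Int × Int)) : ∀ (loc : Option Int) (dl t idx : Int),
    pvLoopB pos l (loc, dl, t, idx) =
      match pvLastRel pos l with
      | none => (loc, dl, t + (l.map pvSize).sum, idx + l.length)
      | some (k, st, _) =>
          (some (idx + (k : Int) + 1), t + ((l.take k).map pvSize).sum + (pos - st),
           t + (l.map pvSize).sum, idx + l.length) := by
  induction l with
  | nil => intro loc dl t idx; simp [pvLoopB, pvLastRel]
  | cons isl rest ih =>
      intro loc dl t idx
      simp only [pvLoopB, ih]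
      rcases h : pvLastRel pos rest with _ | ⟨k, st, en⟩
      · by_cases hc : isl.1 ≤ pos ∧ pos ≤ isl.2 <;>
          simp [pvLastRel, h, hc, pvSize] <;> constructor <;> ring
      · simp [pvLastRel, h, pvSize]
        refine ⟨by ring, by ring, by ring, by omega⟩

theorem pvLastRel_get (pos : Int) (l : List (Int × Int)) (k : Nat) (st en : Int)
    (h : pvLastRel pos l = some (k, st, en)) :
    k < l.length ∧ l[k]? = some (st, en) := by
  induction l generalizing k st en with
  | nil => simp [pvLastRel] at h
  | cons isl rest ih =>
      simp only [pvLastRel] at h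
      rcases h' : pvLastRel pos rest with _ | ⟨k', st', en'⟩ <;> rw [h'] at h
      · by_cases hc : pos ≥ isl.1 ∧ pos ≤ isl.2 <;> simp [hc] at h
        obtain ⟨hk, hp⟩ := h
        subst hk; subst hp
        simp
      · simp at h
        obtain ⟨hk, hst, hen⟩ := h
        subst hst; subst hen; subst hk
        obtain ⟨h1, h2⟩ := ih k' st' en' h'
        refine ⟨by simp; omega, by simpa using h2⟩

-- ===== VERDICT (by name: the statement is the Claim_ definition above) =====
theorem island_location_by_position_spec : Claim_equal_island_location_by_position := by
  unfold Claim_equal_island_location_by_position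
  intro islands pos _
  unfold Spec_island_location_by_position island_location_by_position island_location_by_position_alt
  simp only [pvLocLoop_spec, pvLoopB_spec]
  rcases h : pvLastRel pos islands with _ | ⟨k, st, en⟩
  · simp
  · obtain ⟨hk, hget⟩ := pvLastRel_get pos islands k st en h
    have hL1 : (0 : Int) + (k : Int) + 1 = (k : Int) + 1 := by ring
    have hne : ¬ ((k : Int) + 1 = 0) := by omega
    have hidx : (k : Int) + 1 - 1 = ((k : Nat) : Int) := by ring
    have hsizes : islands.foldl (fun acc isl => acc ++ [isl.2 - isl.1 + 1]) [] =
        islands.map pvSize := by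
      simpa [pvSize] using
        PySem.List.foldl_append_singleton_eq_map (l := islands) (f := fun isl : Int × Int => isl.2 - isl.1 + 1) (acc := [])
    have hcast : ((k : Int) + 1) = (((k + 1 : Nat) : Int)) := by push_cast; ring
    simp only [hL1, hsizes, hcast, PySem.List.slice_from_natCast]
    rw [if_neg (by push_cast; omega : ¬ (((k + 1 : Nat) : Int) = 0))]
    have hidx2 : (((k + 1 : Nat) : Int)) - 1 = ((k : Nat) : Int) := by push_cast; ring
    have hpg : PySem.List.pyGet? islands ((k : Nat) : Int) = islands[k]? := by
      simp [pysem]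
    rw [hidx2, hpg, hget, PySem.List.slice_to_natCast]
    have hsz : (islands.map pvSize)[k]? = some (en - st + 1) := by
      have := List.getElem?_map (f := pvSize) (l := islands) (i := k)
      rw [this, hget]; simp [pvSize]
    have hklen : k < (islands.map pvSize).length := by simpa using hk
    have hdrop : (islands.map pvSize).drop k = (en - st + 1) :: (islands.map pvSize).drop (k + 1) := by
      have hg := List.getElem_cons_drop (as := islands.map pvSize) (h := hklen)
      rw [← hg]
      congr 1
      have h2 := hsz
      rw [List.getElem?_eq_getElem hklen] at h2
      exact Option.some.inj h2
    have hsumsplit : ((islands.map pvSize).take k).sum + ((islands.map pvSize).drop k).sum =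
        (islands.map pvSize).sum := List.sum_take_add_sum_drop _ _
    rw [hdrop] at hsumsplit
    simp only [List.sum_cons] at hsumsplit
    have htake : ((islands.take k).map pvSize) = (islands.map pvSize).take k := by
      rw [List.map_take]
    simp only [Prod.mk.injEq, Option.some.injEq, htake]
    refine ⟨trivial, by ring, by linarith⟩
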